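-- pv_equiv track=rewrite | github.com/RazzkaRusmantoro/neurocode-python | neurocode/services/external/llm_service.py | _enforce_max_connections_per_class
-- ===== SOURCE A (Python) =====
-- from typing import List, Dict, Any, Optional
--
-- def _enforce_max_connections_per_class(
--     relationships: List[Dict[str, Any]], max_per_class: int = 3
-- ) -> List[Dict[str, Any]]:
--     """Drop relationships so no class has more than max_per_class connections (in + out)."""
--     if not relationships:
--         return relationships
--     rels = list(relationships)
--     while True:
--         degree: Dict[str, int] = {}
--         for r in rels:
--             if isinstance(r, dict):
--                 src, tgt = r.get("source"), r.get("target")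
--                 if src:
--                     degree[src] = degree.get(src, 0) + 1
--                 if tgt and tgt != src:
--                     degree[tgt] = degree.get(tgt, 0) + 1
--         over = [cid for cid, d in degree.items() if d > max_per_class]
--         if not over:
--             break
--         to_remove = None
--         for r in rels:
--             src, tgt = r.get("source"), r.get("target")
--             if src in over or tgt in over:
--                 if r.get("relationship") == "dependency":
--                     to_remove = r
--                     break
--         if to_remove is None:
--             for r in rels:
--                 src, tgt = r.get("source"), r.get("target")
--                 if src in over or tgt in over:
--                     to_remove = r
--                     break
--         if to_remove is None:
--             break
--         rels.remove(to_remove)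
--     return rels
-- ===== SOURCE B (Python) =====
-- def _enforce_max_connections_per_class(relationships, max_per_class=3):
--     """Incrementally maintained degree index: the degree table is built ONCE,
--     each round picks the victim by index in a single scan (dependency wins,
--     else first over-touching), removes it with pop(i) and decrements only the
--     victim's two endpoint degrees (deleting keys that drop to zero) instead of
--     recounting the whole list every iteration."""
--     rels = list(relationships)
--     degree = {}
--     for r in rels:
--         if isinstance(r, dict):
--             src, tgt = r.get("source"), r.get("target")
--             if src:
--                 degree[src] = degree.get(src, 0) + 1
--             if tgt and tgt != src:
--                 degree[tgt] = degree.get(tgt, 0) + 1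
--
--     def over(c):
--         return bool(c) and degree.get(c, 0) > max_per_class
--
--     while any(v > max_per_class for v in degree.values()):
--         victim = None
--         for i, r in enumerate(rels):
--             if over(r.get("source")) or over(r.get("target")):
--                 if victim is None:
--                     victim = i
--                 if r.get("relationship") == "dependency":
--                     victim = i
--                     break
--         if victim is None:
--             break
--         r = rels.pop(victim)
--         src, tgt = r.get("source"), r.get("target")
--         if src:
--             degree[src] -= 1
--             if not degree[src]:
--                 del degree[src]
--         if tgt and tgt != src:
--             degree[tgt] -= 1
--             if not degree[tgt]:
--                 del degree[tgt]
--     return rels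
-- ===== Notes on version B (the rewrite author's own statement) =====
-- stated objective: alternative
-- what changed: B maintains the degree table incrementally: it is built once before the loop, each round removes the victim by index (single fused selection scan, dependency wins else first over-toucher) and only decrements the victim's two endpoint degrees (deleting keys that reach zero), instead of recounting all degrees and rebuilding an over-list every iteration.
import Mathlib
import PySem

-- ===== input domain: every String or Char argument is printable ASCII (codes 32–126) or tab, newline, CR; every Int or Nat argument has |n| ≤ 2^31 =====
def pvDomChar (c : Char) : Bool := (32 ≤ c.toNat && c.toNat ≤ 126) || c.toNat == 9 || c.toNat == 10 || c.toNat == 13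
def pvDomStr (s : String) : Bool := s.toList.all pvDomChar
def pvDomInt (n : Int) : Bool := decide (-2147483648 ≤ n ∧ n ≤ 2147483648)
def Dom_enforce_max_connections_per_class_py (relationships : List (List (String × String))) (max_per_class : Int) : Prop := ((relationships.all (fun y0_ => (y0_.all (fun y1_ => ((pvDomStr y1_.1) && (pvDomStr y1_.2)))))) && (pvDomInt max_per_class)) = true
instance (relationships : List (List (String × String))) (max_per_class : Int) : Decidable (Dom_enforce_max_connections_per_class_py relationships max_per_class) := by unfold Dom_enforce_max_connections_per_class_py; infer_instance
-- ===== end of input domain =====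

-- B maintains the degree table incrementally (built once, decremented per removal,
-- victim removed by index) instead of recounting every round ("alternative").

-- ===== PORT A =====
-- r.get(k) on the relationship dict (first-match association-list lookup)
def pvRGet (r : List (String × String)) (k : String) : Option String :=
  (PySem.Dict.mk r).get? k

-- degree[s] = degree.get(s, 0) + 1
def pvIncr (d : PySem.Dict String Int) (s : String) : PySem.Dict String Int :=
  d.insert s (d.getD s 0 + 1)

-- one iteration of the degree-building for-loop (the isinstance guard is always
-- true under this type, every element is a dict); A runs it afresh every round,
-- B runs it once before its loop
def pvStepA (d : PySem.Dict String Int) (r : List (String × String)) : PySem.Dict String Int :=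
  let src := pvRGet r "source"
  let tgt := pvRGet r "target"
  let d1 := match src with
    | some s => if s ≠ "" then pvIncr d s else d
    | none => d
  match tgt with
  | some t => if t ≠ "" ∧ tgt ≠ src then pvIncr d1 t else d1
  | none => d1

-- `x in over` where x = r.get(...) may be None
def pvOptMem (x : Option String) (ovl : List String) : Bool :=
  match x with
  | some s => ovl.contains s
  | none => false

-- A's while-True loop; each non-breaking iteration removes one element, so
-- fuel = length + 1 is never exhausted
def pvALoop (maxp : Int) : Nat → List (List (String × String)) → List (List (String × String))
  | 0, rels => rels
  | fuel + 1, rels =>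
    let degree := rels.foldl pvStepA PySem.Dict.empty
    let ovl := (degree.items.filter (fun kv => decide (kv.2 > maxp))).map Prod.fst
    if ovl.isEmpty then rels
    else
      let toRemove :=
        match rels.find? (fun r =>
            (pvOptMem (pvRGet r "source") ovl || pvOptMem (pvRGet r "target") ovl)
            && (pvRGet r "relationship" == some "dependency")) with
        | some r => some r
        | none => rels.find? (fun r =>
            pvOptMem (pvRGet r "source") ovl || pvOptMem (pvRGet r "target") ovl)
      match toRemove with
      | none => rels
      | some r => pvALoop maxp fuel ((PySem.List.remove? rels r).getD rels)

def enforce_max_connections_per_class_py (relationships : List (List (String × String))) (max_per_class : Int) : List (List (String × String)) :=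
  if relationships.isEmpty then relationships
  else pvALoop max_per_class (relationships.length + 1) relationships

-- ===== PORT B =====
-- over(c): bool(c) and degree.get(c, 0) > max_per_class, on the MAINTAINED dict
def pvOverB (d : PySem.Dict String Int) (maxp : Int) (x : Option String) : Bool :=
  match x with
  | some s => if s = "" then false else decide (d.getD s 0 > maxp)
  | none => false

-- degree[s] -= 1; if not degree[s]: del degree[s]
-- (Source B's degree[s] -= 1 presupposes the key, which the maintained index guarantees;
--  getD reads the same present value)
def pvDecKey (d : PySem.Dict String Int) (s : String) : PySem.Dict String Int :=
  let v := d.getD s 0 - 1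
  if v = 0 then d.erase s else d.insert s v

-- decrement the two endpoint degrees of the popped r (same truthy / tgt != src rules)
def pvDecEnds (d : PySem.Dict String Int) (r : List (String × String)) : PySem.Dict String Int :=
  let src := pvRGet r "source"
  let tgt := pvRGet r "target"
  let d1 := match src with
    | some s => if s ≠ "" then pvDecKey d s else d
    | none => d
  match tgt with
  | some t => if t ≠ "" ∧ tgt ≠ src then pvDecKey d1 t else d1
  | none => d1

-- the single fused selection scan over enumerate(rels): victim index accumulator,
-- dependency wins immediately
def pvSelect (d : PySem.Dict String Int) (maxp : Int) :
    List (Int × List (String × String)) → Option Int → Option Int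
  | [], victim => victim
  | (i, r) :: rest, victim =>
    if pvOverB d maxp (pvRGet r "source") || pvOverB d maxp (pvRGet r "target") then
      let victim' := if victim.isNone then some i else victim
      if pvRGet r "relationship" == some "dependency" then some i
      else pvSelect d maxp rest victim'
    else pvSelect d maxp rest victim

-- B's while loop, carrying the maintained degree dict
def pvBLoop (maxp : Int) : Nat → PySem.Dict String Int → List (List (String × String)) → List (List (String × String))
  | 0, _, rels => rels
  | fuel + 1, d, rels =>
    if !(d.values.any (fun v => decide (v > maxp))) then rels
    else
      match pvSelect d maxp (PySem.List.enumerate rels 0) none with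
      | none => rels
      | some i =>
        match PySem.List.pop? rels i with
        | none => rels            -- unreachable: the selected index is in range
        | some (r, rest) => pvBLoop maxp fuel (pvDecEnds d r) rest

def enforce_max_connections_per_class_py_alt (relationships : List (List (String × String))) (max_per_class : Int) : List (List (String × String)) :=
  pvBLoop max_per_class (relationships.length + 1)
    (relationships.foldl pvStepA PySem.Dict.empty) relationships

-- ===== PRECONDITION & SPEC =====
def Spec_enforce_max_connections_per_class_py (relationships : List (List (String × String))) (max_per_class : Int) (out : List (List (String × String))) : Prop := out = enforce_max_connections_per_class_py_alt relationships max_per_class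
instance (relationships : List (List (String × String))) (max_per_class : Int) (out : List (List (String × String))) : Decidable (Spec_enforce_max_connections_per_class_py relationships max_per_class out) := by unfold Spec_enforce_max_connections_per_class_py; infer_instance

-- ===== CLAIM (what is proved, stated in full; the proofs are below) =====
def Claim_equal_enforce_max_connections_per_class_py : Prop := ∀ (relationships : List (List (String × String))) (max_per_class : Int), Dom_enforce_max_connections_per_class_py relationships max_per_class → Spec_enforce_max_connections_per_class_py relationships max_per_class (enforce_max_connections_per_class_py relationships max_per_class)

-- ===== LEMMAS AND PROOFS =====

-- the multiset of counted endpoints of one relationship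
def pvEndpoints (r : List (String × String)) : List String :=
  let src := pvRGet r "source"
  let tgt := pvRGet r "target"
  (match src with
   | some s => if s ≠ "" then [s] else []
   | none => []) ++
  (match tgt with
   | some t => if t ≠ "" ∧ tgt ≠ src then [t] else []
   | none => [])

def pvFlat (rels : List (List (String × String))) : List String :=
  rels.flatMap pvEndpoints

-- the loop invariant: d is exactly the positive-count degree map of rels
def pvInv (d : PySem.Dict String Int) (rels : List (List (String × String))) : Prop :=
  d.keys.Nodup ∧
  ∀ s : String, d.get? s =
    if 0 < (pvFlat rels).count s then some (((pvFlat rels).count s : Nat) : Int) else none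

-- the canonical selection predicates (B's, on the maintained dict)
def pvP (d : PySem.Dict String Int) (maxp : Int) (r : List (String × String)) : Bool :=
  pvOverB d maxp (pvRGet r "source") || pvOverB d maxp (pvRGet r "target")

def pvD (d : PySem.Dict String Int) (maxp : Int) (r : List (String × String)) : Bool :=
  pvP d maxp r && (pvRGet r "relationship" == some "dependency")

-- A's per-element degree update is the fold of pvIncr over that element's endpoint list
theorem pvStepA_eq_foldl (d : PySem.Dict String Int) (r : List (String × String)) :
    pvStepA d r = (pvEndpoints r).foldl pvIncr d := by
  unfold pvStepA pvEndpoints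
  cases pvRGet r "source" <;> cases pvRGet r "target" <;> simp <;> split_ifs <;>
    simp [List.foldl]

-- A's whole degree dict IS the counter over the flattened endpoint list
theorem degA_eq_counter (rels : List (List (String × String))) :
    rels.foldl pvStepA PySem.Dict.empty = PySem.Dict.counter (pvFlat rels) := by
  have h : pvStepA = fun d r => (pvEndpoints r).foldl pvIncr d :=
    funext fun d => funext fun r => pvStepA_eq_foldl d r
  rw [h, pvFlat, ← List.foldl_flatMap, ← PySem.Dict.foldl_insert_getD_add_one_eq_counter]
  rfl

-- the counter's lookup, in positive-count-map form
theorem counter_get? (xs : List String) (s : String) :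
    (PySem.Dict.counter xs).get? s =
      if 0 < xs.count s then some ((xs.count s : Nat) : Int) else none := by
  by_cases hmem : s ∈ xs
  · have hcount : 0 < xs.count s := List.count_pos_iff.mpr hmem
    rcases h : (PySem.Dict.counter xs).get? s with _ | v
    · exact absurd (by simpa [PySem.Dict.keys_counter, PySem.Set.mem_ofList] using
        (PySem.Dict.get?_eq_none_iff_not_mem_keys (PySem.Dict.counter xs) s).mp h) (by simpa using hmem)
    · have hv : v = (xs.count s : Int) := by
        have := PySem.Dict.getD_counter (xs := xs) (v := s)
        rw [PySem.Dict.getD_eq_get?_getD, h] at this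
        simpa using this
      simp [hcount, hv]
  · have h0 : xs.count s = 0 := List.count_eq_zero.mpr hmem
    rw [(PySem.Dict.get?_eq_none_iff_not_mem_keys (PySem.Dict.counter xs) s).mpr
      (by simpa [PySem.Dict.keys_counter, PySem.Set.mem_ofList] using hmem)]
    simp [h0]

-- the counter satisfies the invariant
theorem counter_inv (rels : List (List (String × String))) :
    pvInv (PySem.Dict.counter (pvFlat rels)) rels :=
  ⟨PySem.Dict.nodup_keys_counter _, fun s => counter_get? _ s⟩

-- the counter-based over test (proof abbreviation)
def pvCOver (xs : List String) (maxp : Int) (x : Option String) : Bool :=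
  match x with
  | some s => (match (PySem.Dict.counter xs).get? s with
               | some v => decide (v > maxp) | none => false)
  | none => false

-- membership in A's `over` list, in terms of the counter's lookup
theorem mem_over_eq (xs : List String) (maxp : Int) (x : Option String) :
    pvOptMem x (((PySem.Dict.counter xs).items.filter (fun kv => decide (kv.2 > maxp))).map Prod.fst)
      = pvCOver xs maxp x := by
  cases x with
  | none => rfl
  | some s =>
    simp only [pvCOver]
    show (((PySem.Dict.counter xs).items.filter (fun kv => decide (kv.2 > maxp))).map Prod.fst).contains s
      = (match (PySem.Dict.counter xs).get? s with
         | some v => decide (v > maxp) | none => false)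
    have hmem : s ∈ ((PySem.Dict.counter xs).items.filter (fun kv => decide (kv.2 > maxp))).map Prod.fst
        ↔ s ∈ xs ∧ (xs.count s : Int) > maxp := by
      simp only [PySem.Dict.items_counter, List.mem_map, List.mem_filter]
      constructor
      · rintro ⟨p, ⟨⟨x, hx, rfl⟩, hc⟩, rfl⟩
        exact ⟨by simpa [PySem.Set.mem_ofList] using hx, by simpa using hc⟩
      · rintro ⟨hx, hc⟩
        exact ⟨(s, (xs.count s : Int)), ⟨⟨s, by simpa [PySem.Set.mem_ofList] using hx, rfl⟩,
          by simpa using hc⟩, rfl⟩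
    rcases h : (PySem.Dict.counter xs).get? s with _ | v
    · have hs : s ∉ xs := by
        have := (PySem.Dict.get?_eq_none_iff_not_mem_keys (PySem.Dict.counter xs) s).mp h
        simpa [PySem.Dict.keys_counter, PySem.Set.mem_ofList] using this
      simp [hmem, hs]
    · have hv : v = (xs.count s : Int) := by
        have := PySem.Dict.getD_counter (xs := xs) (v := s)
        rw [PySem.Dict.getD_eq_get?_getD, h] at this
        simpa using this
      have hs : s ∈ xs := by
        by_contra hns
        rw [(PySem.Dict.get?_eq_none_iff_not_mem_keys (PySem.Dict.counter xs) s).mpr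
          (by simpa [PySem.Dict.keys_counter, PySem.Set.mem_ofList] using hns)] at h
        simp at h
      subst hv
      simp [List.contains_eq_mem, hmem, hs]

-- A's `not over` break test, as an any- over-values test on the counter
theorem over_isEmpty_eq (d : PySem.Dict String Int) (maxp : Int) :
    ((d.items.filter (fun kv => decide (kv.2 > maxp))).map Prod.fst).isEmpty
      = !(d.values.any (fun v => decide (v > maxp))) := by
  simp only [PySem.Dict.values]
  induction d.items with
  | nil => rfl
  | cons p rest ih =>
    by_cases h : p.2 > maxp <;> simp [h, ih]

-- two nodup-keyed dicts with the same lookups have the same any-test on values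
theorem values_any_congr (d d' : PySem.Dict String Int) (p : Int → Bool)
    (hn : d.keys.Nodup) (hn' : d'.keys.Nodup)
    (hg : ∀ s, d.get? s = d'.get? s) :
    d.values.any p = d'.values.any p := by
  rw [Bool.eq_iff_iff]
  simp only [List.any_eq_true, PySem.Dict.values, List.mem_map]
  constructor
  · rintro ⟨v, ⟨⟨k, w⟩, hkv, rfl⟩, hp⟩
    have : d'.get? k = some w := by
      rw [← hg k]; exact ((PySem.Dict.get?_eq_some_iff_mem_items d k w hn).mpr hkv)
    exact ⟨w, ⟨(k, w), (PySem.Dict.get?_eq_some_iff_mem_items d' k w hn').mp this, rfl⟩, hp⟩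
  · rintro ⟨v, ⟨⟨k, w⟩, hkv, rfl⟩, hp⟩
    have : d.get? k = some w := by
      rw [hg k]; exact ((PySem.Dict.get?_eq_some_iff_mem_items d' k w hn').mpr hkv)
    exact ⟨w, ⟨(k, w), (PySem.Dict.get?_eq_some_iff_mem_items d k w hn).mp this, rfl⟩, hp⟩

-- a truthy source/target of a member relationship occurs in the flattened endpoints
theorem mem_flat_of_src (rels : List (List (String × String))) (r : List (String × String))
    (hr : r ∈ rels) (s : String) (hs : pvRGet r "source" = some s) (hne : s ≠ "") :
    s ∈ pvFlat rels := by
  refine List.mem_flatMap.mpr ⟨r, hr, ?_⟩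
  simp [pvEndpoints, hs, hne]

theorem mem_flat_of_tgt (rels : List (List (String × String))) (r : List (String × String))
    (hr : r ∈ rels) (t : String) (ht : pvRGet r "target" = some t) (hne : t ≠ "") :
    t ∈ pvFlat rels := by
  refine List.mem_flatMap.mpr ⟨r, hr, ?_⟩
  unfold pvEndpoints
  rcases hsrc : pvRGet r "source" with _ | s
  · simp [ht, hne]
  · by_cases hts : t = s
    · subst hts; simp [ht, hne]
    · simp [ht, hne, hts]

-- every flattened endpoint is truthy
theorem ne_empty_of_mem_flat (rels : List (List (String × String))) (x : String)
    (hx : x ∈ pvFlat rels) : x ≠ "" := by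
  obtain ⟨r, -, hmem⟩ := List.mem_flatMap.mp hx
  unfold pvEndpoints at hmem
  rcases hs : pvRGet r "source" with _ | s <;> rcases ht : pvRGet r "target" with _ | t <;>
    simp only [hs, ht] at hmem <;> simp at hmem <;> aesop

-- under the invariant, the counter-lookup over-test equals B's maintained-dict test
-- for any optional string whose truthy values occur in the flattened endpoints
theorem over_eq_of_mem_flat (d : PySem.Dict String Int) (maxp : Int)
    (rels : List (List (String × String))) (hInv : pvInv d rels) (x : Option String)
    (hx : ∀ s, x = some s → s ≠ "" → s ∈ pvFlat rels) :
    pvCOver (pvFlat rels) maxp x = pvOverB d maxp x := by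
  obtain ⟨-, hg⟩ := hInv
  cases x with
  | none => rfl
  | some s =>
    simp only [pvCOver]
    by_cases hse : s = ""
    · subst hse
      have h0 : (pvFlat rels).count "" = 0 :=
        List.count_eq_zero.mpr (fun h => (ne_empty_of_mem_flat rels _ h) rfl)
      simp [pvOverB, counter_get?, h0]
    · have hmem : s ∈ pvFlat rels := hx s rfl hse
      have hc : 0 < (pvFlat rels).count s := List.count_pos_iff.mpr hmem
      have hd : d.getD s 0 = ((pvFlat rels).count s : Int) := by
        rw [PySem.Dict.getD_eq_get?_getD, hg s]; simp [hc]
      simp [pvOverB, counter_get?, hc, hse, hd]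

-- under the invariant, A's over-list membership test equals B's dict-lookup test,
-- on members of rels
theorem pred_eq_on_mem (d : PySem.Dict String Int) (maxp : Int)
    (rels : List (List (String × String))) (hInv : pvInv d rels)
    (r : List (String × String)) (hr : r ∈ rels) :
    (pvOptMem (pvRGet r "source") (((PySem.Dict.counter (pvFlat rels)).items.filter (fun kv => decide (kv.2 > maxp))).map Prod.fst)
      || pvOptMem (pvRGet r "target") (((PySem.Dict.counter (pvFlat rels)).items.filter (fun kv => decide (kv.2 > maxp))).map Prod.fst))
      = pvP d maxp r := by
  rw [mem_over_eq, mem_over_eq, pvP,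
    over_eq_of_mem_flat d maxp rels hInv _ (fun s hs => mem_flat_of_src rels r hr s hs),
    over_eq_of_mem_flat d maxp rels hInv _ (fun t ht => mem_flat_of_tgt rels r hr t ht)]

-- find? only depends on the predicate's values on members
theorem find?_congr_mem {α : Type} (l : List α) (p q : α → Bool)
    (h : ∀ x ∈ l, p x = q x) : l.find? p = l.find? q := by
  induction l with
  | nil => rfl
  | cons x xs ih =>
    have hx := h x (by simp)
    simp only [List.find?_cons, hx]
    cases q x
    · exact ih (fun y hy => h y (by simp [hy]))
    · rfl

-- B's fused scan, characterised by the two first-index searches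
theorem pvSelect_eq (d : PySem.Dict String Int) (maxp : Int) :
    ∀ (rels : List (List (String × String))) (n : Int) (acc : Option Int),
    pvSelect d maxp (PySem.List.enumerate rels n) acc
      = match rels.findIdx? (pvD d maxp) with
        | some j => some (n + j)
        | none =>
          match acc with
          | some a => some a
          | none =>
            match rels.findIdx? (pvP d maxp) with
            | some j => some (n + (j : Int))
            | none => none := by
  intro rels
  induction rels with
  | nil => intro n acc; cases acc <;> rfl
  | cons r rest ih =>
    intro n acc
    rw [PySem.List.enumerate_cons]
    simp only [pvSelect]
    by_cases hP : (pvOverB d maxp (pvRGet r "source") || pvOverB d maxp (pvRGet r "target")) = true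
    · rw [if_pos hP]
      have hPr : pvP d maxp r = true := hP
      by_cases hD : (pvRGet r "relationship" == some "dependency") = true
      · rw [if_pos hD]
        have hDr : pvD d maxp r = true := by simp [pvD, hPr, hD]
        simp [List.findIdx?_cons, hDr]
      · rw [if_neg hD]
        have hDr : pvD d maxp r = false := by simp [pvD, hD]
        rw [ih (n + 1) _]
        simp only [List.findIdx?_cons, hDr, Bool.false_eq_true, if_false]
        cases hfD : rest.findIdx? (pvD d maxp) with
        | some j =>
          simp only [hfD, Option.map_some]
          simp; omega
        | none =>
          simp only [hfD, Option.map_none]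
          cases acc with
          | some a => simp
          | none =>
            simp only [Option.isNone_none, if_true]
            simp [List.findIdx?_cons, hPr]
    · rw [if_neg hP]
      have hPr : pvP d maxp r = false := by
        unfold pvP; exact Bool.not_eq_true _ ▸ (by simpa using hP)
      have hDr : pvD d maxp r = false := by simp [pvD, hPr]
      rw [ih (n + 1) acc]
      simp only [List.findIdx?_cons, hDr, hPr, Bool.false_eq_true, if_false]
      cases hfD : rest.findIdx? (pvD d maxp) with
      | some j =>
        simp only [hfD, Option.map_some]
        congr 1; push_cast; ring
      | none =>
        simp only [hfD, Option.map_none]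
        cases acc with
        | some a => simp
        | none =>
          cases hfP : rest.findIdx? (pvP d maxp) with
          | some j =>
            simp only [hfP, Option.map_some]
            simp; omega
          | none => simp [hfP]

-- the element found first by a value-based predicate is removed at its index:
-- list.remove(found) = pop at the found index
theorem find_pop_remove (p : List (String × String) → Bool) :
    ∀ (rels : List (List (String × String))) (j : Nat),
    rels.findIdx? p = some j →
    ∃ r rest, rels.find? p = some r ∧ PySem.List.pop? rels (j : Int) = some (r, rest) ∧
      PySem.List.remove? rels r = some rest ∧ rels.Perm (r :: rest) := by
  intro rels
  induction rels with
  | nil => intro j h; simp at h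
  | cons x xs ih =>
    intro j h
    by_cases hx : p x
    · rw [List.findIdx?_cons, if_pos hx] at h
      obtain rfl : j = 0 := by simpa using h.symm
      exact ⟨x, xs, by simp [hx], by simp [PySem.List.pop?_zero_cons],
        by simp, List.Perm.refl _⟩
    · rw [List.findIdx?_cons, if_neg (by simpa using hx)] at h
      cases hf : xs.findIdx? p with
      | none => rw [hf] at h; simp at h
      | some j' =>
        rw [hf] at h
        obtain rfl : j = j' + 1 := by simpa using h.symm
        obtain ⟨r, rest, h1, h2, h3, h4⟩ := ih j' hf
        have hj' : j' < xs.length := (List.findIdx?_eq_some_iff_findIdx_eq.mp hf).1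
        rw [PySem.List.pop?_natCast xs j' hj'] at h2
        have hr : xs[j'] = r := by simpa using congrArg (fun o => o.map Prod.fst) h2
        have hrest : xs.eraseIdx j' = rest := by
          simpa using congrArg (fun o => o.map Prod.snd) h2
        have hps : p r = true := List.find?_some h1
        have hxr : x ≠ r := fun he => hx (he ▸ hps)
        refine ⟨r, x :: rest, ?_, ?_, ?_, ?_⟩
        · rw [List.find?_cons_of_neg hx]; exact h1
        · have hlt : j' + 1 < (x :: xs).length := by simp; omega
          rw [PySem.List.pop?_natCast (x :: xs) (j' + 1) hlt]
          simp [List.eraseIdx_cons_succ, hr, hrest]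
        · rw [PySem.List.remove?_cons_of_ne xs hxr, h3]; rfl
        · exact (h4.cons x).trans (List.Perm.swap r x rest)

-- lookups after `del degree[k]` (Dict.erase)
theorem find?_filter_ne (k x : String) (hxk : x ≠ k) :
    ∀ (l : List (String × Int)),
    List.find? (fun p => p.1 == x) (l.filter (fun p => !(p.1 == k)))
      = List.find? (fun p => p.1 == x) l := by
  intro l
  induction l with
  | nil => rfl
  | cons q qs ih =>
    by_cases hq : q.1 = k
    · rw [List.filter_cons_of_neg (by simp [hq]),
        List.find?_cons_of_neg (by simp [hq]; exact fun h => hxk h.symm)]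
      exact ih
    · rw [List.filter_cons_of_pos (by simp [hq])]
      by_cases hqx : (q.1 == x) = true
      · simp only [List.find?_cons, hqx]
      · have hqx' : (q.1 == x) = false := by simpa using hqx
        simp only [List.find?_cons, hqx']
        exact ih

theorem get?_erase (d : PySem.Dict String Int) (k x : String) :
    (d.erase k).get? x = if x = k then none else d.get? x := by
  show Option.map _ (List.find? _ (d.items.filter _)) = _
  by_cases hxk : x = k
  · subst hxk
    rw [List.find?_eq_none.mpr]
    · simp
    · intro p hp
      have := List.of_mem_filter hp
      simp at this ⊢
      exact this
  · rw [find?_filter_ne k x hxk d.items]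
    simp [hxk, PySem.Dict.get?]

theorem nodup_keys_erase (d : PySem.Dict String Int) (k : String) (hn : d.keys.Nodup) :
    (d.erase k).keys.Nodup := by
  have hsub : ((d.items.filter (fun p => !(p.1 == k))).map (fun p => p.1)).Sublist
      (d.items.map (fun p => p.1)) :=
    List.Sublist.map _ List.filter_sublist
  exact hn.sublist hsub

-- the invariant's shape, over an abstract count function
def pvShape (d : PySem.Dict String Int) (f : String → Nat) : Prop :=
  d.keys.Nodup ∧ ∀ x, d.get? x = if 0 < f x then some ((f x : Nat) : Int) else none

theorem pvShape_congr (d : PySem.Dict String Int) (f f' : String → Nat)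
    (h : pvShape d f) (he : ∀ x, f x = f' x) : pvShape d f' :=
  ⟨h.1, fun x => by rw [h.2 x, he x]⟩

-- one decrement step preserves the positive-count-map shape
theorem pvDecKey_shape (d : PySem.Dict String Int) (f : String → Nat) (s : String)
    (h : pvShape d f) (hs : 0 < f s) :
    pvShape (pvDecKey d s) (fun x => if x = s then f s - 1 else f x) := by
  obtain ⟨hn, hg⟩ := h
  have hget : d.getD s 0 = ((f s : Nat) : Int) := by
    rw [PySem.Dict.getD_eq_get?_getD, hg s]; simp [hs]
  unfold pvDecKey
  rw [hget]
  by_cases h1 : f s = 1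
  · rw [if_pos (by simp [h1])]
    refine ⟨nodup_keys_erase d s hn, fun x => ?_⟩
    rw [get?_erase]
    by_cases hxs : x = s
    · simp [hxs, h1]
    · simp [hxs, hg x]
  · rw [if_neg (by omega)]
    refine ⟨PySem.Dict.nodup_keys_insert d s _ hn, fun x => ?_⟩
    rw [PySem.Dict.get?_insert]
    by_cases hxs : x = s
    · have h2 : 0 < f s - 1 := by omega
      simp [hxs, h2]
      omega
    · simp [hxs, hg x]

-- removing the selected relationship and decrementing its endpoints preserves pvInv
theorem pvDecEnds_inv (d : PySem.Dict String Int)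
    (rels rest : List (List (String × String))) (r : List (String × String))
    (hInv : pvInv d rels) (hperm : rels.Perm (r :: rest)) :
    pvInv (pvDecEnds d r) rest := by
  have hshape : pvShape d (fun x => (pvFlat rels).count x) := hInv
  have hc : ∀ x, (pvFlat rels).count x = (pvEndpoints r).count x + (pvFlat rest).count x := by
    intro x
    have hp2 : (pvFlat rels).Perm (pvEndpoints r ++ pvFlat rest) := by
      simpa [pvFlat] using List.Perm.flatMap_right pvEndpoints hperm
    rw [hp2.count_eq, List.count_append]
  show pvShape _ _
  rcases hsrc : pvRGet r "source" with _ | sval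
  all_goals rcases htgt : pvRGet r "target" with _ | tval
  all_goals simp only [pvDecEnds, hsrc, htgt]
  · -- src none, tgt none: no decrement, endpoints empty
    refine pvShape_congr d _ _ hshape (fun x => ?_)
    have := hc x
    simp [pvEndpoints, hsrc, htgt] at this
    omega
  · -- src none, tgt some
    by_cases hcond : tval ≠ "" ∧ (some tval : Option String) ≠ none
    · rw [if_pos hcond]
      have he : ∀ x, (pvEndpoints r).count x = if x = tval then 1 else 0 := by
        intro x
        simp [pvEndpoints, hsrc, htgt, hcond.1, List.count_cons, List.count_nil]
        by_cases hx : x = tval <;> simp [hx] <;> exact fun hh => hx hh.symm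
      have ht0 : 0 < (pvFlat rels).count tval := by
        rw [hc tval, he tval]; simp
      refine pvShape_congr _ _ _ (pvDecKey_shape d _ tval hshape ht0) (fun x => ?_)
      have h1 := hc x
      rw [he x] at h1
      by_cases hx : x = tval <;> simp [hx] at h1 ⊢ <;> omega
    · rw [if_neg hcond]
      have htv : tval = "" := by
        by_contra h; exact hcond ⟨h, by simp⟩
      refine pvShape_congr d _ _ hshape (fun x => ?_)
      have := hc x
      simp [pvEndpoints, hsrc, htgt, htv] at this
      omega
  · -- src some, tgt none
    by_cases hsv : sval ≠ ""
    · rw [if_pos hsv]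
      have he : ∀ x, (pvEndpoints r).count x = if x = sval then 1 else 0 := by
        intro x
        simp [pvEndpoints, hsrc, htgt, hsv, List.count_cons, List.count_nil]
        by_cases hx : x = sval <;> simp [hx] <;> exact fun hh => hx hh.symm
      have hs0 : 0 < (pvFlat rels).count sval := by
        rw [hc sval, he sval]; simp
      refine pvShape_congr _ _ _ (pvDecKey_shape d _ sval hshape hs0) (fun x => ?_)
      have h1 := hc x
      rw [he x] at h1
      by_cases hx : x = sval <;> simp [hx] at h1 ⊢ <;> omega
    · rw [if_neg hsv]
      have hsv' : sval = "" := by simpa using hsv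
      refine pvShape_congr d _ _ hshape (fun x => ?_)
      have := hc x
      simp [pvEndpoints, hsrc, htgt, hsv'] at this
      omega
  · -- src some, tgt some
    by_cases hsv : sval ≠ ""
    · rw [if_pos hsv]
      by_cases hcond : tval ≠ "" ∧ (some tval : Option String) ≠ some sval
      · rw [if_pos hcond]
        have hts : tval ≠ sval := by
          intro h; exact hcond.2 (by rw [h])
        have hts' : sval ≠ tval := fun h => hts h.symm
        have he : ∀ x, (pvEndpoints r).count x
            = (if x = sval then 1 else 0) + (if x = tval then 1 else 0) := by
          intro x
          simp [pvEndpoints, hsrc, htgt, hsv, hcond.1, hts, List.count_cons, List.count_nil]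
          by_cases hx : x = sval <;> by_cases hx' : x = tval <;>
            simp_all [eq_comm]
        have hs0 : 0 < (pvFlat rels).count sval := by
          rw [hc sval, he sval]; simp
        have hshape1 := pvDecKey_shape d _ sval hshape hs0
        have ht0 : 0 < (if tval = sval then (pvFlat rels).count sval - 1
            else (pvFlat rels).count tval) := by
          rw [if_neg hts, hc tval, he tval]
          simp [hts]
        have hshape2 := pvDecKey_shape _ _ tval hshape1 ht0
        refine pvShape_congr _ _ _ hshape2 (fun x => ?_)
        have h1 := hc x
        rw [he x] at h1
        by_cases hx : x = tval <;> by_cases hx' : x = sval <;>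
          simp [hx, hx', hts, hts'] at h1 ⊢ <;> omega
      · rw [if_neg hcond]
        have hd : tval = "" ∨ tval = sval := by
          rcases not_and_or.mp hcond with h | h
          · exact Or.inl (by simpa using h)
          · exact Or.inr (by simpa using h)
        have he : ∀ x, (pvEndpoints r).count x = if x = sval then 1 else 0 := by
          intro x
          rcases hd with h | h <;>
            simp [pvEndpoints, hsrc, htgt, hsv, h, List.count_cons, List.count_nil] <;>
            by_cases hx : x = sval <;> simp [hx] <;> exact fun hh => hx hh.symm
        have hs0 : 0 < (pvFlat rels).count sval := by
          rw [hc sval, he sval]; simp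
        refine pvShape_congr _ _ _ (pvDecKey_shape d _ sval hshape hs0) (fun x => ?_)
        have h1 := hc x
        rw [he x] at h1
        by_cases hx : x = sval <;> simp [hx] at h1 ⊢ <;> omega
    · rw [if_neg hsv]
      have hsv' : sval = "" := by simpa using hsv
      by_cases hcond : tval ≠ "" ∧ (some tval : Option String) ≠ some sval
      · rw [if_pos hcond]
        have he : ∀ x, (pvEndpoints r).count x = if x = tval then 1 else 0 := by
          intro x
          simp [pvEndpoints, hsrc, htgt, hsv', hcond.1, List.count_cons, List.count_nil]
          by_cases hx : x = tval <;> simp [hx] <;> exact fun hh => hx hh.symm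
        have ht0 : 0 < (pvFlat rels).count tval := by
          rw [hc tval, he tval]; simp
        refine pvShape_congr _ _ _ (pvDecKey_shape d _ tval hshape ht0) (fun x => ?_)
        have h1 := hc x
        rw [he x] at h1
        by_cases hx : x = tval <;> simp [hx] at h1 ⊢ <;> omega
      · rw [if_neg hcond]
        have hd : tval = "" ∨ tval = sval := by
          rcases not_and_or.mp hcond with h | h
          · exact Or.inl (by simpa using h)
          · exact Or.inr (by simpa using h)
        have he : ∀ x, (pvEndpoints r).count x = 0 := by
          intro x
          rcases hd with h | h <;> simp [pvEndpoints, hsrc, htgt, hsv', h]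
        refine pvShape_congr d _ _ hshape (fun x => ?_)
        have h1 := hc x
        rw [he x] at h1
        omega

-- the two loops agree under the invariant
theorem loop_eq (maxp : Int) :
    ∀ (fuel : Nat) (rels : List (List (String × String))) (d : PySem.Dict String Int),
    pvInv d rels → pvALoop maxp fuel rels = pvBLoop maxp fuel d rels := by
  intro fuel
  induction fuel with
  | zero => intro rels d _; rfl
  | succ fuel ih =>
    intro rels d hInv
    simp only [pvALoop, pvBLoop, degA_eq_counter]
    have htest : (((PySem.Dict.counter (pvFlat rels)).items.filter
          (fun kv => decide (kv.2 > maxp))).map Prod.fst).isEmpty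
        = !(d.values.any (fun v => decide (v > maxp))) := by
      rw [over_isEmpty_eq]
      rw [values_any_congr (PySem.Dict.counter (pvFlat rels)) d (fun v => decide (v > maxp))
        (PySem.Dict.nodup_keys_counter _) hInv.1 (fun s => by rw [counter_get?, hInv.2 s])]
    rw [htest]
    by_cases hstop : (!(d.values.any (fun v => decide (v > maxp)))) = true
    · rw [if_pos hstop, if_pos hstop]
    · rw [if_neg hstop, if_neg hstop]
      have hD : rels.find? (fun r =>
          (pvOptMem (pvRGet r "source") (((PySem.Dict.counter (pvFlat rels)).items.filter (fun kv => decide (kv.2 > maxp))).map Prod.fst)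
            || pvOptMem (pvRGet r "target") (((PySem.Dict.counter (pvFlat rels)).items.filter (fun kv => decide (kv.2 > maxp))).map Prod.fst))
          && (pvRGet r "relationship" == some "dependency")) = rels.find? (pvD d maxp) :=
        find?_congr_mem _ _ _ (fun r hr => by
          rw [pvD, pred_eq_on_mem d maxp rels hInv r hr])
      have hP : rels.find? (fun r =>
          pvOptMem (pvRGet r "source") (((PySem.Dict.counter (pvFlat rels)).items.filter (fun kv => decide (kv.2 > maxp))).map Prod.fst)
            || pvOptMem (pvRGet r "target") (((PySem.Dict.counter (pvFlat rels)).items.filter (fun kv => decide (kv.2 > maxp))).map Prod.fst)) = rels.find? (pvP d maxp) :=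
        find?_congr_mem _ _ _ (fun r hr => by
          rw [pvP, pred_eq_on_mem d maxp rels hInv r hr]; rfl)
      rw [hD, hP, pvSelect_eq d maxp rels 0 none]
      cases hfD : rels.findIdx? (pvD d maxp) with
      | some j =>
        obtain ⟨r, rest, h1, h2, h3, h4⟩ := find_pop_remove (pvD d maxp) rels j hfD
        have h0j : ((0 : Int) + (j : Int)) = (j : Int) := by omega
        rw [h1]
        dsimp only
        rw [h3, h0j, h2]
        dsimp only
        simp only [Option.getD_some]
        exact ih rest (pvDecEnds d r) (pvDecEnds_inv d rels rest r hInv h4)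
      | none =>
        have hfD' : rels.find? (pvD d maxp) = none :=
          List.find?_eq_none.mpr (fun r hr =>
            by simpa using (List.findIdx?_eq_none_iff.mp hfD) r hr)
        rw [hfD']
        dsimp only
        cases hfP : rels.findIdx? (pvP d maxp) with
        | some j =>
          obtain ⟨r, rest, h1, h2, h3, h4⟩ := find_pop_remove (pvP d maxp) rels j hfP
          have h0j : ((0 : Int) + (j : Int)) = (j : Int) := by omega
          rw [h1]
          dsimp only
          rw [h0j, h3, h2]
          dsimp only
          simp only [Option.getD_some]
          exact ih rest (pvDecEnds d r) (pvDecEnds_inv d rels rest r hInv h4)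
        | none =>
          have hfP' : rels.find? (pvP d maxp) = none :=
            List.find?_eq_none.mpr (fun r hr =>
              by simpa using (List.findIdx?_eq_none_iff.mp hfP) r hr)
          rw [hfP']

-- ===== VERDICT (by name: the statement is the Claim_ definition above) =====
theorem enforce_max_connections_per_class_py_spec : Claim_equal_enforce_max_connections_per_class_py := by
  intro relationships max_per_class _
  unfold Spec_enforce_max_connections_per_class_py
  unfold enforce_max_connections_per_class_py enforce_max_connections_per_class_py_alt
  rw [degA_eq_counter]
  cases relationships with
  | nil => rfl
  | cons r rest =>
    simpa using loop_eq max_per_class (rest.length + 1 + 1) (r :: rest) _ (counter_inv _)
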